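-- pv_equiv track=rewrite | github.com/namonroyr/Proyecto-Criptograf-a | grafo1.py | tipo1
-- ===== SOURCE A (Python) =====
-- def tipo1(x,y,n):
--   paths = set()
--   curr = (x,y)
--   for i in range(n+1):
--     next = (curr[0] + 1 , curr[1] + i)
--     segment = (curr, next)
--     curr = next
--     paths.add(segment)
--   return paths
-- ===== SOURCE B (Python) =====
-- def tipo1(x, y, n):
--     # closed form: after i steps the point is (x+i, y+i*(i-1)//2)
--     return {((x + i, y + i * (i - 1) // 2), (x + i + 1, y + i * (i + 1) // 2))
--             for i in range(n + 1)}
-- ===== Notes on version B (the rewrite author's own statement) =====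
-- stated objective: alternative
-- what changed: Replaces the sequential point accumulator with a closed-form formula (x+i, y+i*(i-1)//2) for each segment endpoint, building the set in one comprehension with independent iterations.
import Mathlib
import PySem

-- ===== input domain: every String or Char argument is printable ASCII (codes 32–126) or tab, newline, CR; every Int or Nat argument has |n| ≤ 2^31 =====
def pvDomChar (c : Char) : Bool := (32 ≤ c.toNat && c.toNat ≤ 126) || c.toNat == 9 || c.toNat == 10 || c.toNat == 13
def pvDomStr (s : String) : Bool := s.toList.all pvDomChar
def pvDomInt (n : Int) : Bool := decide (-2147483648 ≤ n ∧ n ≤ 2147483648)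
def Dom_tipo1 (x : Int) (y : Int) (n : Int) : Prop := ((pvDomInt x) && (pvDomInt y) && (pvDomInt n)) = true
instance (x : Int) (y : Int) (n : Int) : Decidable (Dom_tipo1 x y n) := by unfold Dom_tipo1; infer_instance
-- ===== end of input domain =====

-- B computes each segment by the closed form (x+i, y+i*(i-1)//2) instead of A's sequential accumulator (alternative decomposition, same O(n) cost).


-- ===== PORT A =====
def tipo1 (x : Int) (y : Int) (n : Int) : List ((Int × Int) × (Int × Int)) :=
  ((PySem.List.pyRange 0 (n+1) 1).foldl
    (fun (st : (Int × Int) × PySem.Set ((Int × Int) × (Int × Int))) i =>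
      let next := (st.1.1 + 1, st.1.2 + i)
      (next, PySem.Set.add st.2 (st.1, next)))
    ((x, y), PySem.Set.empty)).2

-- ===== PORT B =====
def tipo1_alt (x : Int) (y : Int) (n : Int) : List ((Int × Int) × (Int × Int)) :=
  PySem.Set.ofList ((PySem.List.pyRange 0 (n+1) 1).map
    (fun i => ((x + i, y + PySem.Int.floordiv (i * (i - 1)) 2),
               (x + i + 1, y + PySem.Int.floordiv (i * (i + 1)) 2))))

-- ===== PRECONDITION & SPEC =====
def Spec_tipo1 (x : Int) (y : Int) (n : Int) (out : List ((Int × Int) × (Int × Int))) : Prop := out = tipo1_alt x y n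
instance (x : Int) (y : Int) (n : Int) (out : List ((Int × Int) × (Int × Int))) : Decidable (Spec_tipo1 x y n out) := by unfold Spec_tipo1; infer_instance

-- ===== CLAIM (what is proved, stated in full; the proofs are below) =====
def Claim_equal_tipo1 : Prop := ∀ (x : Int) (y : Int) (n : Int), Dom_tipo1 x y n → Spec_tipo1 x y n (tipo1 x y n)

-- ===== LEMMAS AND PROOFS =====

-- the closed-form segment for iteration i
def pvSeg (x y i : Int) : (Int × Int) × (Int × Int) :=
  ((x + i, y + PySem.Int.floordiv (i * (i - 1)) 2),
   (x + i + 1, y + PySem.Int.floordiv (i * (i + 1)) 2))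

theorem pvSeg_injective (x y : Int) : Function.Injective (pvSeg x y) := by
  intro a b h
  simp only [pvSeg, Prod.mk.injEq] at h
  omega

theorem pvT_step (y m : Int) : y + PySem.Int.floordiv (m * (m - 1)) 2 + m
    = y + PySem.Int.floordiv (m * (m + 1)) 2 := by
  have h2 : (2:Int) ≠ 0 := by norm_num
  have he : m * (m + 1) = m * (m - 1) + m * 2 := by ring
  rw [PySem.Int.floordiv_eq_ediv_of_pos (by norm_num), PySem.Int.floordiv_eq_ediv_of_pos (by norm_num),
      he, Int.add_mul_ediv_right _ _ h2]
  ring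

-- loop invariant: after m iterations the state is the closed-form point and the list of segments
theorem pvLoop (x y : Int) (m : Nat) :
    (PySem.List.pyRange 0 (m : Int) 1).foldl
      (fun (st : (Int × Int) × PySem.Set ((Int × Int) × (Int × Int))) i =>
        let next := (st.1.1 + 1, st.1.2 + i)
        (next, PySem.Set.add st.2 (st.1, next)))
      ((x, y), PySem.Set.empty)
    = ((x + m, y + PySem.Int.floordiv ((m : Int) * ((m : Int) - 1)) 2),
       (PySem.List.pyRange 0 (m : Int) 1).map (pvSeg x y)) := by
  induction m with
  | zero =>
    simp [PySem.List.pyRange_one_eq_nil, PySem.Set.empty, PySem.Int.floordiv]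
  | succ k ih =>
    have hk : (0:Int) ≤ (k : Int) := by positivity
    have hc : ((k+1:Nat):Int) = (k:Int) + 1 := by push_cast; ring
    rw [hc, PySem.List.pyRange_one_succ_right hk, List.foldl_append, List.map_append, ih]
    simp only [List.foldl_cons, List.foldl_nil, List.map_cons, List.map_nil]
    have hnotmem : pvSeg x y (k : Int) ∉ (PySem.List.pyRange 0 (k : Int) 1).map (pvSeg x y) := by
      intro hmem
      rcases List.mem_map.mp hmem with ⟨j, hj, hje⟩
      have := pvSeg_injective x y hje
      have := (PySem.List.mem_pyRange_one.mp hj).2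
      omega
    have heq : ((x + (k:Int), y + PySem.Int.floordiv ((k:Int) * ((k:Int) - 1)) 2),
        (x + (k:Int) + 1, y + PySem.Int.floordiv ((k:Int) * ((k:Int) - 1)) 2 + (k:Int)))
        = pvSeg x y (k:Int) := by
      unfold pvSeg
      rw [pvT_step]
    rw [heq, PySem.Set.add_of_not_mem hnotmem]
    have harg : ((k:Int)+1)*(((k:Int)+1)-1) = (k:Int)*((k:Int)+1) := by ring
    rw [harg, pvT_step]
    simp [add_assoc]

theorem pvNodup (x y b : Int) : ((PySem.List.pyRange 0 b 1).map (pvSeg x y)).Nodup :=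
  (PySem.List.nodup_pyRange_one 0 b).map (pvSeg_injective x y)

-- ===== VERDICT (by name: the statement is the Claim_ definition above) =====
theorem tipo1_spec : Claim_equal_tipo1 := by
  intro x y n _
  unfold Spec_tipo1 tipo1 tipo1_alt
  rw [show (fun i => ((x + i, y + PySem.Int.floordiv (i * (i - 1)) 2),
               (x + i + 1, y + PySem.Int.floordiv (i * (i + 1)) 2))) = pvSeg x y from rfl]
  have hof := PySem.Set.ofList_eq_self_of_nodup _ (pvNodup x y (n+1))
  rw [hof]
  by_cases h : n + 1 ≤ 0
  · rw [PySem.List.pyRange_one_eq_nil h]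
    simp [PySem.Set.empty]
  · obtain ⟨m, hm⟩ : ∃ m : Nat, n + 1 = (m : Int) := ⟨(n+1).toNat, by omega⟩
    rw [hm, pvLoop]
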